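-- pv_equiv track=rewrite | github.com/rupsabasu2020/sequential_relevant_cp | package_folder/core.py | rejection_count
-- ===== SOURCE A (Python) =====
-- def rejection_count(test_stat, asymptotics):
--     """
--     Calculate the rejection count for given test statistics and asymptotic values.
--     Args:
--         test_stat (dict): A dictionary where keys are theta values and values are test statistics.
--         asymptotics (dict): A dictionary where keys are theta values and values are asymptotic critical values.
--     Returns:
--         tuple: A tuple containing:
--             - rejection_perTheta (dict): A dictionary where keys are theta values and values are 1 if the test statistic
--               is greater than or equal to the asymptotic critical value, otherwise 0.
--             - global_rejection (list): A list containing a single element, 1 if any of the values in rejection_perTheta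
--               are 1, otherwise 0.
--     """
--
--     sorted_asymptotics_keys = sorted(asymptotics.keys())
--     rejection_perTheta={}
--
--     for key1, stat_value in test_stat.items():
--         # Find the largest key2 in asymptotics that is less than or equal to key1
--         valid_key2 = max((key2 for key2 in sorted_asymptotics_keys if key2 <= key1), default=None)
--         if valid_key2 is not None:
--             # Compare test_stat[key1] with asymptotics[valid_key2]
--             rejection_perTheta[valid_key2] = 1 if stat_value >= asymptotics[valid_key2] else 0
--         else:
--             # If no valid key2 is found, assume no rejection
--             rejection_perTheta[valid_key2] = 0
--     global_rejection =[ 1 if any(value == 1 for value in rejection_perTheta.values()) else 0]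
--     return rejection_perTheta, global_rejection
-- ===== SOURCE B (Python) =====
-- def rejection_count(test_stat, asymptotics):
--     # Sort the asymptotics keys once; find each entry's floor key by binary search
--     # (hand-written bisect_right) instead of scanning all keys per entry.
--     keys = sorted(asymptotics)
--     rejection_perTheta = {}
--     for key1, stat_value in test_stat.items():
--         lo, hi = 0, len(keys)
--         while lo < hi:
--             mid = (lo + hi) // 2
--             if keys[mid] <= key1:
--                 lo = mid + 1
--             else:
--                 hi = mid
--         if lo > 0:
--             k = keys[lo - 1]
--             rejection_perTheta[k] = 1 if stat_value >= asymptotics[k] else 0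
--         else:
--             rejection_perTheta[None] = 0
--     global_rejection = [1 if any(v == 1 for v in rejection_perTheta.values()) else 0]
--     return rejection_perTheta, global_rejection
-- ===== Notes on version B (the rewrite author's own statement) =====
-- stated objective: faster
-- what changed: Sorts the asymptotics keys once and finds each test_stat entry's floor key with a hand-written bisect_right binary search, replacing A's per-entry generator scan + max over all keys.
import Mathlib
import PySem

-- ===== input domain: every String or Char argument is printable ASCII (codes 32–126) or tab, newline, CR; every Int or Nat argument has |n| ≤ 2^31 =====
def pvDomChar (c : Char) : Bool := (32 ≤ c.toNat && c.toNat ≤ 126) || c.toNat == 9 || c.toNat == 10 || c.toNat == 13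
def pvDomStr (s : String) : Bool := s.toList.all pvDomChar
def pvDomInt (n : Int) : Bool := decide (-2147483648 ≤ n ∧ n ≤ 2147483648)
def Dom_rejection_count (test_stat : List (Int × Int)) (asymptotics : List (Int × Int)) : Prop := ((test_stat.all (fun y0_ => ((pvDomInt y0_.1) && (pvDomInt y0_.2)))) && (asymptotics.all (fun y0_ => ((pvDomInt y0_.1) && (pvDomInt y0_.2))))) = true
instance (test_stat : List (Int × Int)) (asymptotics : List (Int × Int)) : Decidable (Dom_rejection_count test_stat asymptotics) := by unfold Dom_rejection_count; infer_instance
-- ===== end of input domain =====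

-- B replaces A's per-entry scan+max over all asymptotics keys by one sort plus a binary search per entry.

-- ===== PORT A =====
def rejection_count (test_stat : List (Int × Int)) (asymptotics : List (Int × Int)) : (List (Option Int × Int)) × List Int :=
  let asym : PySem.Dict Int Int := PySem.Dict.ofList asymptotics
  let sorted_asymptotics_keys := PySem.List.sorted asym.keys (fun x => x) false
  let rejection_perTheta : PySem.Dict (Option Int) Int :=
    (PySem.Dict.ofList test_stat).items.foldl (fun d p =>
      -- valid_key2 = max((key2 for key2 in sorted_asymptotics_keys if key2 <= key1), default=None)
      match PySem.List.max? (sorted_asymptotics_keys.filter (fun k2 => decide (k2 ≤ p.1))) (fun x => x) with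
      | some valid_key2 =>
          -- asymptotics[valid_key2]: the key is always present here, so getD is exact
          d.insert (some valid_key2) (if p.2 ≥ asym.getD valid_key2 0 then 1 else 0)
      | none => d.insert none 0) PySem.Dict.empty
  (rejection_perTheta.items,
   [if rejection_perTheta.values.any (fun v => v == 1) then 1 else 0])

-- ===== PORT B =====
-- hand-written bisect_right loop of Source B: while lo < hi: mid = (lo+hi)//2; ...
def bsLoop (keys : List Int) (x : Int) (lo hi : Nat) : Nat :=
  if _h : lo < hi then
    let mid := (lo + hi) / 2
    -- keys[mid]: 0 ≤ mid < hi ≤ len(keys) at every call site, so getD is exact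
    if keys.getD mid 0 ≤ x then bsLoop keys x (mid + 1) hi
    else bsLoop keys x lo mid
  else lo
termination_by hi - lo
decreasing_by all_goals omega

def rejection_count_alt (test_stat : List (Int × Int)) (asymptotics : List (Int × Int)) : (List (Option Int × Int)) × List Int :=
  let asym : PySem.Dict Int Int := PySem.Dict.ofList asymptotics
  let keys := PySem.List.sorted asym.keys (fun x => x) false
  let rejection_perTheta : PySem.Dict (Option Int) Int :=
    (PySem.Dict.ofList test_stat).items.foldl (fun d p =>
      let lo := bsLoop keys p.1 0 keys.length
      if lo > 0 then
        let k := keys.getD (lo - 1) 0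
        d.insert (some k) (if p.2 ≥ asym.getD k 0 then 1 else 0)
      else d.insert none 0) PySem.Dict.empty
  (rejection_perTheta.items,
   [if rejection_perTheta.values.any (fun v => v == 1) then 1 else 0])

-- ===== PRECONDITION & SPEC =====
def Spec_rejection_count (test_stat : List (Int × Int)) (asymptotics : List (Int × Int)) (out : (List (Option Int × Int)) × List Int) : Prop := out = rejection_count_alt test_stat asymptotics
instance (test_stat : List (Int × Int)) (asymptotics : List (Int × Int)) (out : (List (Option Int × Int)) × List Int) : Decidable (Spec_rejection_count test_stat asymptotics out) := by unfold Spec_rejection_count; infer_instance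

-- ===== CLAIM (what is proved, stated in full; the proofs are below) =====
def Claim_equal_rejection_count : Prop := ∀ (test_stat : List (Int × Int)) (asymptotics : List (Int × Int)), Dom_rejection_count test_stat asymptotics → Spec_rejection_count test_stat asymptotics (rejection_count test_stat asymptotics)

-- ===== LEMMAS AND PROOFS =====

theorem bsLoop_spec (keys : List Int) (x : Int) (lo hi : Nat)
    (hs : keys.Pairwise (· ≤ ·)) (hhi : hi ≤ keys.length) (hlo : lo ≤ hi)
    (h1 : ∀ j (_ : j < keys.length), j < lo → keys[j] ≤ x)
    (h2 : ∀ j (_ : j < keys.length), hi ≤ j → x < keys[j]) :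
    bsLoop keys x lo hi ≤ keys.length ∧
      (∀ j (_ : j < keys.length), j < bsLoop keys x lo hi → keys[j] ≤ x) ∧
      (∀ j (_ : j < keys.length), bsLoop keys x lo hi ≤ j → x < keys[j]) := by
  have hmono := (List.pairwise_iff_getElem).mp hs
  induction lo, hi using bsLoop.induct keys x with
  | case1 lo hi hlt mid hle ih =>
      rw [bsLoop, dif_pos hlt, if_pos hle]
      have hmlt : (lo + hi) / 2 < keys.length := by omega
      have hget : keys.getD ((lo+hi)/2) 0 = keys[(lo+hi)/2] := List.getD_eq_getElem _ _ hmlt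
      exact ih hhi (by omega)
        (fun j hj hjlt => by
          rcases Nat.lt_or_ge j ((lo+hi)/2) with h | h
          · rcases Nat.lt_or_ge j lo with h' | h'
            · exact h1 j hj h'
            · exact le_trans (hmono j ((lo+hi)/2) hj hmlt h) (hget ▸ hle)
          · have : j = (lo+hi)/2 := by omega
            subst this; exact hget ▸ hle)
        h2
  | case2 lo hi hlt mid hgt ih =>
      rw [bsLoop, dif_pos hlt, if_neg hgt]
      have hmlt : (lo + hi) / 2 < keys.length := by omega
      have hget : keys.getD ((lo+hi)/2) 0 = keys[(lo+hi)/2] := List.getD_eq_getElem _ _ hmlt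
      exact ih (by omega) (by omega) h1
        (fun j hj hjge => by
          rcases Nat.lt_or_ge j ((lo+hi)/2 + 1) with h | h
          · have : j = (lo+hi)/2 := by omega
            subst this; exact lt_of_not_ge (fun hc => hgt (hget ▸ hc))
          · exact lt_of_lt_of_le (lt_of_not_ge (fun hc => hgt (hget ▸ hc)))
              (hmono ((lo+hi)/2) j hmlt hj (by omega)))
  | case3 lo hi hlt =>
      rw [bsLoop, dif_neg hlt]
      exact ⟨by omega, h1, fun j hj hle => h2 j hj (by omega)⟩
theorem filter_eq_take {α : Type} (l : List α) (p : α → Bool) (r : Nat) (hr : r ≤ l.length)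
    (h1 : ∀ j (_ : j < l.length), j < r → p l[j] = true)
    (h2 : ∀ j (_ : j < l.length), r ≤ j → p l[j] = false) :
    l.filter p = l.take r := by
  induction l generalizing r with
  | nil => simp
  | cons a t ih =>
      cases r with
      | zero =>
          have ha : p a = false := h2 0 (by simp) (by omega)
          simp only [List.take_zero, List.filter_cons, ha, Bool.false_eq_true, if_false]
          exact ih 0 (by omega) (fun j hj hlt => by omega)
            (fun j hj _ => h2 (j+1) (by simpa using Nat.succ_lt_succ hj) (by omega))
      | succ r' =>
          have ha : p a = true := h1 0 (by simp) (by omega)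
          simp only [List.take_succ_cons, List.filter_cons, ha, if_true]
          congr 1
          rw [ih r' (by simpa using hr)
            (fun j hj hlt => h1 (j+1) (by simpa using Nat.succ_lt_succ hj) (by omega))
            (fun j hj hge => h2 (j+1) (by simpa using Nat.succ_lt_succ hj) (by omega))]

theorem foldl_max_sorted (t : List Int) (x : Int) (h : (x :: t).Pairwise (· ≤ ·)) :
    t.foldl max x = (x :: t).getLast (by simp) := by
  induction t generalizing x with
  | nil => simp
  | cons y t' ih =>
      have hxy : x ≤ y := (List.pairwise_cons.mp h).1 y (by simp)
      have : max x y = y := max_eq_right hxy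
      simp only [List.foldl_cons, this, List.getLast_cons (by simp : y :: t' ≠ [])]
      exact ih y (List.pairwise_cons.mp h).2

theorem max?_id_eq_getLast (l : List Int) (h : l ≠ []) (hp : l.Pairwise (· ≤ ·)) :
    PySem.List.max? l (fun y => y) = some (l.getLast h) := by
  cases l with
  | nil => exact absurd rfl h
  | cons a t => rw [PySem.List.max?_id_cons, foldl_max_sorted t a hp]

theorem branch_eq (keys : List Int) (hs : keys.Pairwise (· < ·)) (x : Int) :
    PySem.List.max? (keys.filter (fun k2 => decide (k2 ≤ x))) (fun y => y) =
      (if bsLoop keys x 0 keys.length > 0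
       then some (keys.getD (bsLoop keys x 0 keys.length - 1) 0) else none) := by
  have hs' : keys.Pairwise (· ≤ ·) := hs.imp le_of_lt
  obtain ⟨hr, hA, hB⟩ := bsLoop_spec keys x 0 keys.length hs' (le_refl _) (Nat.zero_le _)
    (fun j hj hlt => absurd hlt (by omega)) (fun j hj hge => absurd hge (by omega))
  set r := bsLoop keys x 0 keys.length with hrdef
  have hfilter : keys.filter (fun k2 => decide (k2 ≤ x)) = keys.take r :=
    filter_eq_take keys _ r hr
      (fun j hj hlt => decide_eq_true (hA j hj hlt))
      (fun j hj hge => decide_eq_false (not_le.mpr (hB j hj hge)))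
  rw [hfilter]
  rcases Nat.eq_zero_or_pos r with h0 | hpos
  · simp [h0, PySem.List.max?]
  · have hne : keys.take r ≠ [] := by
      intro hc
      rcases List.take_eq_nil_iff.mp hc with h | h
      · omega
      · subst h; simp at hr; omega
    have hpair : (keys.take r).Pairwise (· ≤ ·) :=
      List.Pairwise.sublist (List.take_sublist r keys) hs'
    rw [max?_id_eq_getLast _ hne hpair, if_pos hpos]
    have hr1 : r - 1 < keys.length := by omega
    have hlast : (keys.take r).getLast hne = keys[r-1] := by
      rw [List.getLast_eq_getElem]
      rw [List.getElem_take]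
      congr 1
      simp [List.length_take]
      omega
    rw [hlast, List.getD_eq_getElem _ _ hr1]

theorem sorted_keys_pairwise_lt (asymptotics : List (Int × Int)) :
    (PySem.List.sorted (PySem.Dict.ofList asymptotics).keys (fun x => x) false).Pairwise (· < ·) := by
  have hle := PySem.List.sorted_pairwise (PySem.Dict.ofList asymptotics).keys (fun x => x)
  have hnd : (PySem.List.sorted (PySem.Dict.ofList asymptotics).keys (fun x => x) false).Nodup :=
    (PySem.List.sorted_perm _ _ _).nodup_iff.mpr (PySem.Dict.nodup_keys_ofList asymptotics)
  exact (hle.and hnd).imp (fun h => lt_of_le_of_ne h.1 h.2)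

theorem step_eq (asym : PySem.Dict Int Int) (keys : List Int) (hs : keys.Pairwise (· < ·)) :
    (fun (d : PySem.Dict (Option Int) Int) (p : Int × Int) =>
      match PySem.List.max? (keys.filter (fun k2 => decide (k2 ≤ p.1))) (fun x => x) with
      | some valid_key2 => d.insert (some valid_key2) (if p.2 ≥ asym.getD valid_key2 0 then 1 else 0)
      | none => d.insert none 0)
    = (fun (d : PySem.Dict (Option Int) Int) (p : Int × Int) =>
      let lo := bsLoop keys p.1 0 keys.length
      if lo > 0 then
        let k := keys.getD (lo - 1) 0
        d.insert (some k) (if p.2 ≥ asym.getD k 0 then 1 else 0)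
      else d.insert none 0) := by
  funext d p
  rw [branch_eq keys hs p.1]
  by_cases h : bsLoop keys p.1 0 keys.length > 0
  · simp only [if_pos h]
  · simp only [if_neg h]

-- ===== VERDICT (by name: the statement is the Claim_ definition above) =====
theorem rejection_count_spec : Claim_equal_rejection_count := by
  intro test_stat asymptotics _
  unfold Spec_rejection_count rejection_count rejection_count_alt
  dsimp only
  rw [step_eq (PySem.Dict.ofList asymptotics) _ (sorted_keys_pairwise_lt asymptotics)]
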